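-- pv_equiv track=rewrite | github.com/rgj7/coding_challenges | codeabb/Python/p97_girls_and_pigs.py | girls_and_pigs
-- ===== SOURCE A (Python) =====
-- def girls_and_pigs(legs, breasts):
--     solutions = 0
--     max_pigs = legs // 4
--     for pigs in range(1, max_pigs + 1):  # we assume solutions must contain one of each
--         girls = (legs - (pigs * 4)) // 2
--         if girls:  # we assume solutions must contain one of each
--             remaining_breasts = breasts - (girls * 2)
--             if remaining_breasts % pigs == 0 and (remaining_breasts // pigs) % 2 == 0:  # pigs must have even breasts
--                 solutions += 1
--     return solutions
-- ===== SOURCE B (Python) =====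
-- def girls_and_pigs(legs, breasts):
--     max_pigs = legs // 4
--     if max_pigs < 1:
--         return 0
--     # D = breasts - 2*girls_offset; condition reduces to "2*pigs divides D"
--     D = breasts - legs + (legs % 2)
--     excl = max_pigs if legs % 4 <= 1 else 0  # pigs value with girls == 0 (0 = none)
--     if D == 0:
--         return max_pigs - (1 if excl else 0)
--     if D % 2 != 0:
--         return 0
--     M = abs(D) // 2
--     count = 0
--     i = 1
--     while i * i <= M:
--         if M % i == 0:
--             if i <= max_pigs and i != excl:
--                 count += 1
--             j = M // i
--             if j != i and j <= max_pigs and j != excl: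
--                 count += 1
--         i += 1
--     return count
-- ===== Notes on version B (the rewrite author's own statement) =====
-- stated objective: faster
-- what changed: A scans every candidate pig count from 1 to legs//4 and tests each; B reduces A's per-candidate test algebraically to '2*pigs divides the constant D = breasts - legs + legs%2' and enumerates the divisors of |D|/2 in pairs up to its square root, handling D == 0, odd D and the girls == 0 boundary candidate in O(1).
import Mathlib
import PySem

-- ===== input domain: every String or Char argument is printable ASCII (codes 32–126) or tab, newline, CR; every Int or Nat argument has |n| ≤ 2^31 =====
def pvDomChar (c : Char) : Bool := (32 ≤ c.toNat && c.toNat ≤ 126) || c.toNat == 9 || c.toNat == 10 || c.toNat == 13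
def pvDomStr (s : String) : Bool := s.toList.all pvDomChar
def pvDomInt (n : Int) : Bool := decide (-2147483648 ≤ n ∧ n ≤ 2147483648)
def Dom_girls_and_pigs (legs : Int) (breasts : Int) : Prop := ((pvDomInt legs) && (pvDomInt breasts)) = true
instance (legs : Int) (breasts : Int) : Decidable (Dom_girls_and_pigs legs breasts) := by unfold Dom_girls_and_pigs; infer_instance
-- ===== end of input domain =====

-- B replaces A's scan over every candidate pig count by a divisor enumeration up to the
-- square root of the constant D = breasts - legs + legs % 2 (the loop test reduces to
-- "2*pigs divides D").

-- ===== PORT A =====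
def girls_and_pigs (legs : Int) (breasts : Int) : Int :=
  let max_pigs := PySem.Int.floordiv legs 4
  (PySem.List.pyRange 1 (max_pigs + 1)).foldl
    (fun solutions pigs =>
      let girls := PySem.Int.floordiv (legs - pigs * 4) 2
      if girls ≠ 0 then
        let remaining_breasts := breasts - girls * 2
        if PySem.Int.mod remaining_breasts pigs = 0 ∧
            PySem.Int.mod (PySem.Int.floordiv remaining_breasts pigs) 2 = 0 then
          solutions + 1
        else solutions
      else solutions) 0

-- ===== PORT B =====
-- the `while i * i <= M` loop of Source B (fuel = M.toNat bounds the iteration count)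
def gapAltLoop (M max_pigs excl : Int) : Nat → Int → Int → Int
  | 0, _, count => count
  | fuel + 1, i, count =>
      if i * i ≤ M then
        let count1 :=
          if PySem.Int.mod M i = 0 then
            let c := if i ≤ max_pigs ∧ i ≠ excl then count + 1 else count
            let j := PySem.Int.floordiv M i
            if j ≠ i ∧ j ≤ max_pigs ∧ j ≠ excl then c + 1 else c
          else count
        gapAltLoop M max_pigs excl fuel (i + 1) count1
      else count

def girls_and_pigs_alt (legs : Int) (breasts : Int) : Int :=
  let max_pigs := PySem.Int.floordiv legs 4
  if max_pigs < 1 then 0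
  else
    let D := breasts - legs + PySem.Int.mod legs 2
    let excl := if PySem.Int.mod legs 4 ≤ 1 then max_pigs else 0
    if D = 0 then max_pigs - (if excl ≠ 0 then 1 else 0)
    else if PySem.Int.mod D 2 ≠ 0 then 0
    else
      let M := PySem.Int.floordiv (D.natAbs : Int) 2
      gapAltLoop M max_pigs excl M.toNat 1 0

-- ===== PRECONDITION & SPEC =====
def Spec_girls_and_pigs (legs : Int) (breasts : Int) (out : Int) : Prop := out = girls_and_pigs_alt legs breasts
instance (legs : Int) (breasts : Int) (out : Int) : Decidable (Spec_girls_and_pigs legs breasts out) := by unfold Spec_girls_and_pigs; infer_instance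

-- ===== CLAIM (what is proved, stated in full; the proofs are below) =====
def Claim_equal_girls_and_pigs : Prop := ∀ (legs : Int) (breasts : Int), Dom_girls_and_pigs legs breasts → Spec_girls_and_pigs legs breasts (girls_and_pigs legs breasts)

-- ===== LEMMAS AND PROOFS =====

-- the candidate pig counts {1, …, m} as a computable Finset
def gapBase (m : Int) : Finset Int := (Finset.range m.toNat).image (fun k : Nat => ((k : Int) + 1))

lemma mem_gapBase (m x : Int) : x ∈ gapBase m ↔ 1 ≤ x ∧ x ≤ m := by
  simp only [gapBase, Finset.mem_image, Finset.mem_range]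
  constructor
  · rintro ⟨k, hk, rfl⟩; omega
  · intro hx; exact ⟨(x - 1).toNat, by omega, by omega⟩

lemma card_gapBase (m : Int) : (gapBase m).card = m.toNat := by
  rw [gapBase, Finset.card_image_of_injective _ (fun a b h => by omega), Finset.card_range]

-- the pig counts not yet accounted for when the divisor loop's counter is at i
def gapT (M m e i : Int) : Finset Int :=
  (gapBase m).filter (fun p => p ∣ M ∧ p ≠ e ∧ i ≤ p ∧ i ≤ M / p)

lemma mem_gapT (M m e i p : Int) :
    p ∈ gapT M m e i ↔ (1 ≤ p ∧ p ≤ m) ∧ p ∣ M ∧ p ≠ e ∧ i ≤ p ∧ i ≤ M / p := by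
  simp [gapT, mem_gapBase, and_assoc]

lemma gapT_empty (M m e i : Int) (hi : 1 ≤ i) (h : M < i * i) : gapT M m e i = ∅ := by
  ext p
  simp only [mem_gapT, Finset.notMem_empty, iff_false]
  rintro ⟨⟨hp1, hpm⟩, hdvd, hne, hip, hiq⟩
  have h3 : i * p ≤ M := (Int.le_ediv_iff_mul_le (by omega)).1 hiq
  nlinarith

lemma gapT_step_ndvd (M m e i : Int) (hndvd : ¬ i ∣ M) :
    gapT M m e i = gapT M m e (i + 1) := by
  ext p
  simp only [mem_gapT]
  constructor
  · rintro ⟨hb, hdvd, hne, hip, hiq⟩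
    have hpM : M / p * p = M := Int.ediv_mul_cancel hdvd
    have hpi : p ≠ i := fun h => hndvd (h ▸ hdvd)
    have hqi : M / p ≠ i := fun h => hndvd ⟨p, by rw [← hpM, h]⟩
    exact ⟨hb, hdvd, hne,
      Int.add_one_le_iff.mpr (lt_of_le_of_ne hip (fun h => hpi h.symm)),
      Int.add_one_le_iff.mpr (lt_of_le_of_ne hiq (fun h => hqi h.symm))⟩
  · rintro ⟨hb, hdvd, hne, hip, hiq⟩
    exact ⟨hb, hdvd, hne, by linarith, by linarith⟩

lemma gapT_step_dvd (M m e i : Int) (hi : 1 ≤ i) (hsq : i * i ≤ M) (hdvd : i ∣ M) :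
    ((gapT M m e i).card : Int) =
      ((if i ≤ m ∧ i ≠ e then (1:Int) else 0) +
        (if M / i ≠ i ∧ M / i ≤ m ∧ M / i ≠ e then (1:Int) else 0)) +
      (gapT M m e (i + 1)).card := by
  have hiM : M / i * i = M := Int.ediv_mul_cancel hdvd
  have hij : i ≤ M / i := (Int.le_ediv_iff_mul_le (by omega)).2 hsq
  have h1j : 1 ≤ M / i := le_trans hi hij
  have hjdvd : M / i ∣ M := ⟨i, hiM.symm⟩
  have hMj : M / (M / i) = i := by
    have h := Int.ediv_mul_cancel hjdvd
    have h2 : i * (M / i) = M := by rw [mul_comm]; exact hiM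
    exact mul_right_cancel₀ (ne_of_gt (by linarith)) (h.trans h2.symm)
  -- a member of gapT i that is gone from gapT (i+1) is i or M / i
  have hdiffmem : ∀ p, p ∈ gapT M m e i \ gapT M m e (i + 1) ↔
      (p = i ∨ p = M / i) ∧ p ∈ gapT M m e i := by
    intro p
    simp only [Finset.mem_sdiff, mem_gapT]
    constructor
    · rintro ⟨⟨hb, hdvdp, hne, hip, hiq⟩, hnot⟩
      have hpM : M / p * p = M := Int.ediv_mul_cancel hdvdp
      have hca : p = i ∨ p = M / i := by
        by_cases hpi : p = i
        · exact Or.inl hpi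
        · right
          have hqi : M / p = i := by
            by_contra hqi
            exact hnot ⟨hb, hdvdp, hne,
              Int.add_one_le_iff.mpr (lt_of_le_of_ne hip (fun h => hpi h.symm)),
              Int.add_one_le_iff.mpr (lt_of_le_of_ne hiq (fun h => hqi h.symm))⟩
          have hpiM : i * p = M := by rw [← hpM, hqi]
          rw [← hpiM]
          exact (Int.mul_ediv_cancel_left p (by omega)).symm
      exact ⟨hca, ⟨hb, hdvdp, hne, hip, hiq⟩⟩
    · rintro ⟨hcase, hb, hdvdp, hne, hip, hiq⟩
      refine ⟨⟨hb, hdvdp, hne, hip, hiq⟩, ?_⟩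
      rintro ⟨_, _, _, hip', hiq'⟩
      rcases hcase with rfl | rfl
      · omega
      · rw [hMj] at hiq'; omega
  have hsub : gapT M m e (i + 1) ⊆ gapT M m e i := by
    intro p hp
    rw [mem_gapT] at hp ⊢
    exact ⟨hp.1, hp.2.1, hp.2.2.1, by linarith [hp.2.2.2.1], by linarith [hp.2.2.2.2]⟩
  have hcards := Finset.card_sdiff_add_card_eq_card hsub
  have hmemi : i ∈ gapT M m e i ↔ (i ≤ m ∧ i ≠ e) := by
    rw [mem_gapT]
    constructor
    · rintro ⟨⟨_, h1⟩, _, h2, _, _⟩; exact ⟨h1, h2⟩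
    · rintro ⟨h1, h2⟩; exact ⟨⟨hi, h1⟩, hdvd, h2, le_refl i, hij⟩
  have hmemj : M / i ∈ gapT M m e i ↔ (M / i ≤ m ∧ M / i ≠ e) := by
    rw [mem_gapT]
    constructor
    · rintro ⟨⟨_, h1⟩, _, h2, _, _⟩; exact ⟨h1, h2⟩
    · rintro ⟨h1, h2⟩; exact ⟨⟨h1j, h1⟩, hjdvd, h2, hij, by rw [hMj]⟩
  have hdcard : ((gapT M m e i \ gapT M m e (i + 1)).card : Int) =
      ((if i ≤ m ∧ i ≠ e then (1:Int) else 0) +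
        (if M / i ≠ i ∧ M / i ≤ m ∧ M / i ≠ e then (1:Int) else 0)) := by
    by_cases hI : i ≤ m ∧ i ≠ e
    · by_cases hJ : M / i ≠ i ∧ M / i ≤ m ∧ M / i ≠ e
      · rw [if_pos hI, if_pos hJ]
        have hset : gapT M m e i \ gapT M m e (i + 1) = {i, M / i} := by
          ext p
          rw [hdiffmem]
          simp only [Finset.mem_insert, Finset.mem_singleton]
          constructor
          · rintro ⟨h, _⟩; exact h
          · rintro (rfl | rfl)
            · exact ⟨Or.inl rfl, hmemi.2 hI⟩
            · exact ⟨Or.inr rfl, hmemj.2 ⟨hJ.2.1, hJ.2.2⟩⟩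
        rw [hset, Finset.card_insert_of_notMem (by simp [Ne.symm hJ.1]), Finset.card_singleton]
        norm_num
      · rw [if_pos hI, if_neg hJ]
        have hset : gapT M m e i \ gapT M m e (i + 1) = {i} := by
          ext p
          rw [hdiffmem]
          simp only [Finset.mem_singleton]
          constructor
          · rintro ⟨h | h, hmem⟩
            · exact h
            · subst h
              rw [hmemj] at hmem
              by_cases hji : M / i = i
              · exact hji
              · exact absurd ⟨hji, hmem.1, hmem.2⟩ hJ
          · rintro rfl; exact ⟨Or.inl rfl, hmemi.2 hI⟩
        rw [hset, Finset.card_singleton]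
        norm_num
    · by_cases hJ : M / i ≠ i ∧ M / i ≤ m ∧ M / i ≠ e
      · rw [if_neg hI, if_pos hJ]
        have hset : gapT M m e i \ gapT M m e (i + 1) = {M / i} := by
          ext p
          rw [hdiffmem]
          simp only [Finset.mem_singleton]
          constructor
          · rintro ⟨h | h, hmem⟩
            · subst h; rw [hmemi] at hmem; exact absurd hmem hI
            · exact h
          · rintro rfl; exact ⟨Or.inr rfl, hmemj.2 ⟨hJ.2.1, hJ.2.2⟩⟩
        rw [hset, Finset.card_singleton]
        norm_num
      · rw [if_neg hI, if_neg hJ]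
        have hset : gapT M m e i \ gapT M m e (i + 1) = ∅ := by
          ext p
          rw [hdiffmem]
          simp only [Finset.notMem_empty, iff_false]
          rintro ⟨h | h, hmem⟩
          · subst h; rw [hmemi] at hmem; exact absurd hmem hI
          · subst h
            rw [hmemj] at hmem
            by_cases hji : M / i = i
            · rw [hji] at hmem; exact absurd hmem hI
            · exact absurd ⟨hji, hmem.1, hmem.2⟩ hJ
        rw [hset, Finset.card_empty]
        norm_num
  rw [← hcards]
  push_cast
  omega

lemma gapAltLoop_spec (M m e : Int) :
    ∀ (fuel : Nat) (i count : Int), 1 ≤ i → M < (i + (fuel : Int)) * (i + (fuel : Int)) →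
      gapAltLoop M m e fuel i count = count + (gapT M m e i).card := by
  intro fuel
  induction fuel with
  | zero =>
    intro i c hi hlt
    rw [gapAltLoop, gapT_empty M m e i hi (by simpa using hlt)]
    simp
  | succ n ih =>
    intro i c hi hlt
    simp only [gapAltLoop]
    by_cases hsq : i * i ≤ M
    · rw [if_pos hsq]
      have hnext : M < (i + 1 + (n : Int)) * (i + 1 + (n : Int)) := by
        have h : i + 1 + (n : Int) = i + ((n : Int) + 1) := by ring
        rw [h]; push_cast at hlt; exact hlt
      by_cases hdvd : i ∣ M
      · have hmod : PySem.Int.mod M i = 0 := (PySem.Int.mod_eq_zero_iff_dvd M i).2 hdvd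
        have hfd : PySem.Int.floordiv M i = M / i := PySem.Int.floordiv_eq_ediv_of_pos (by omega)
        rw [if_pos hmod, hfd]
        rw [ih (i + 1) _ (by omega) hnext, gapT_step_dvd M m e i hi hsq hdvd]
        split_ifs <;> push_cast <;> ring
      · have hmod : ¬ PySem.Int.mod M i = 0 := fun h => hdvd ((PySem.Int.mod_eq_zero_iff_dvd M i).1 h)
        rw [if_neg hmod]
        rw [ih (i + 1) c (by omega) hnext, gapT_step_ndvd M m e i hdvd]
    · rw [if_neg hsq]
      rw [gapT_empty M m e i hi (by omega)]
      simp

-- Python's `x % p == 0 and (x // p) % 2 == 0` says exactly that 2*p divides x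
lemma gap_div2p (p x : Int) (hp : 1 ≤ p) :
    (PySem.Int.mod x p = 0 ∧ PySem.Int.mod (PySem.Int.floordiv x p) 2 = 0) ↔ 2 * p ∣ x := by
  constructor
  · rintro ⟨h1, h2⟩
    obtain ⟨k, rfl⟩ := (PySem.Int.mod_eq_zero_iff_dvd x p).1 h1
    have hfd : PySem.Int.floordiv (p * k) p = k := by
      rw [PySem.Int.floordiv_eq_ediv_of_pos (by omega)]
      exact Int.mul_ediv_cancel_left k (by omega)
    rw [hfd] at h2
    obtain ⟨t, rfl⟩ := (PySem.Int.mod_eq_zero_iff_dvd k 2).1 h2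
    exact ⟨t, by ring⟩
  · rintro ⟨k, rfl⟩
    have hfd : PySem.Int.floordiv (2 * p * k) p = 2 * k := by
      rw [PySem.Int.floordiv_eq_ediv_of_pos (by omega), show 2 * p * k = p * (2 * k) by ring]
      exact Int.mul_ediv_cancel_left (2 * k) (by omega)
    refine ⟨(PySem.Int.mod_eq_zero_iff_dvd _ _).2 ⟨2 * k, by ring⟩, ?_⟩
    rw [hfd]
    exact (PySem.Int.mod_eq_zero_iff_dvd _ _).2 ⟨k, by ring⟩

lemma gap_countP_card (n : Nat) (P : Int → Prop) [DecidablePred P] :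
    (((PySem.List.pyRange 1 ((n : Int) + 1)).countP (fun p => decide (P p))) : Int) =
      (((gapBase (n : Int)).filter P).card : Int) := by
  induction n with
  | zero =>
    have h1 : PySem.List.pyRange (1 : Int) 1 = [] :=
      List.eq_nil_iff_forall_not_mem.mpr (fun x hx => by
        rw [PySem.List.mem_pyRange_one] at hx; omega)
    have h2 : gapBase ((0 : Nat) : Int) = ∅ := by
      ext x; simp only [mem_gapBase, Finset.notMem_empty, iff_false]; omega
    rw [h2]
    push_cast
    rw [h1]
    simp
  | succ k ih =>
    have hr : PySem.List.pyRange (1 : Int) (((k + 1 : Nat) : Int) + 1) =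
        PySem.List.pyRange 1 ((k : Int) + 1) ++ [(k : Int) + 1] := by
      have hcast : (((k + 1 : Nat)) : Int) + 1 = ((k : Int) + 1) + 1 := by push_cast; ring
      rw [hcast]
      exact PySem.List.pyRange_one_succ_right (by omega)
    have hb : gapBase (((k + 1 : Nat)) : Int) = insert ((k : Int) + 1) (gapBase (k : Int)) := by
      ext x
      simp only [mem_gapBase, Finset.mem_insert]
      push_cast
      omega
    rw [hr, hb, List.countP_append, Finset.filter_insert]
    by_cases hP : P ((k : Int) + 1)
    · rw [if_pos hP, Finset.card_insert_of_notMem (by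
        simp only [Finset.mem_filter, mem_gapBase]
        rintro ⟨⟨_, h⟩, _⟩; omega)]
      simp only [List.countP_cons, List.countP_nil, hP, decide_true]
      push_cast
      omega
    · rw [if_neg hP]
      simp only [List.countP_cons, List.countP_nil, hP, decide_false]
      push_cast
      omega

-- the remaining-breasts test of A, rewritten as a divisibility statement about the constant D
lemma gap_condA_iff (legs breasts p n : Int) (hfd4 : legs / 4 = n)
    (hp : 1 ≤ p ∧ p < n + 1) :
    (PySem.Int.floordiv (legs - p * 4) 2 ≠ 0 ∧
      (PySem.Int.mod (breasts - PySem.Int.floordiv (legs - p * 4) 2 * 2) p = 0 ∧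
       PySem.Int.mod (PySem.Int.floordiv
         (breasts - PySem.Int.floordiv (legs - p * 4) 2 * 2) p) 2 = 0)) ↔
      (2 * p ∣ (breasts - legs + legs % 2) ∧
        p ≠ (if legs % 4 ≤ 1 then n else 0)) := by
  have hp1 : 1 ≤ p := hp.1
  have hpm : p ≤ n := by omega
  have hlegs : 4 ≤ legs := by omega
  have hfg : PySem.Int.floordiv (legs - p * 4) 2 = (legs - p * 4) / 2 :=
    PySem.Int.floordiv_eq_ediv_of_pos (by norm_num)
  rw [hfg]
  have hrem : breasts - (legs - p * 4) / 2 * 2 = (breasts - legs + legs % 2) + 4 * p := by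
    omega
  rw [hrem, gap_div2p p _ hp1]
  have h4p : 2 * p ∣ 4 * p := ⟨2, by ring⟩
  have hdvd48 : 2 * p ∣ (breasts - legs + legs % 2) + 4 * p ↔
      2 * p ∣ (breasts - legs + legs % 2) := by
    constructor
    · intro h
      have := dvd_sub h h4p
      simpa using this
    · intro h
      exact dvd_add h h4p
  rw [hdvd48]
  have hgiff : ((legs - p * 4) / 2 ≠ 0) ↔ p ≠ (if legs % 4 ≤ 1 then n else 0) := by
    split_ifs with h4
    · constructor <;> intro h <;> intro hc <;> apply h <;> omega
    · constructor <;> intro h <;> intro hc <;> [omega; omega]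
  rw [hgiff, and_comm]

-- ===== VERDICT (by name: the statement is the Claim_ definition above) =====
theorem girls_and_pigs_spec : Claim_equal_girls_and_pigs := by
  intro legs breasts _
  show girls_and_pigs legs breasts = girls_and_pigs_alt legs breasts
  -- A's loop is a count of the pig values passing its test
  have hA : girls_and_pigs legs breasts =
      ((PySem.List.pyRange 1 (PySem.Int.floordiv legs 4 + 1)).countP
        (fun p => decide (PySem.Int.floordiv (legs - p * 4) 2 ≠ 0 ∧
          (PySem.Int.mod (breasts - PySem.Int.floordiv (legs - p * 4) 2 * 2) p = 0 ∧
           PySem.Int.mod (PySem.Int.floordiv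
             (breasts - PySem.Int.floordiv (legs - p * 4) 2 * 2) p) 2 = 0))) : Int) := by
    simp only [girls_and_pigs]
    rw [PySem.List.foldl_congr_mem _ _
        (fun solutions p => if (PySem.Int.floordiv (legs - p * 4) 2 ≠ 0 ∧
          (PySem.Int.mod (breasts - PySem.Int.floordiv (legs - p * 4) 2 * 2) p = 0 ∧
           PySem.Int.mod (PySem.Int.floordiv
             (breasts - PySem.Int.floordiv (legs - p * 4) 2 * 2) p) 2 = 0))
          then solutions + 1 else solutions) 0
        (fun acc p _ => by
          by_cases h1 : PySem.Int.floordiv (legs - p * 4) 2 ≠ 0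
          · by_cases h2 : PySem.Int.mod (breasts - PySem.Int.floordiv (legs - p * 4) 2 * 2) p = 0 ∧
                PySem.Int.mod (PySem.Int.floordiv
                  (breasts - PySem.Int.floordiv (legs - p * 4) 2 * 2) p) 2 = 0
            · simp only [if_pos h1, if_pos h2, if_pos (And.intro h1 h2)]
            · simp only [if_pos h1, if_neg h2, if_neg (fun h => h2 (And.right h))]
          · simp only [if_neg h1, if_neg (fun h => h1 (And.left h))])]
    rw [PySem.List.foldl_ite_add_one]
    simp
  by_cases hm1 : PySem.Int.floordiv legs 4 < 1
  · -- no candidate pig counts at all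
    have hempty : PySem.List.pyRange 1 (PySem.Int.floordiv legs 4 + 1) = [] :=
      List.eq_nil_iff_forall_not_mem.mpr (fun x hx => by
        rw [PySem.List.mem_pyRange_one] at hx; omega)
    rw [hA, hempty]
    simp only [girls_and_pigs_alt]
    rw [if_pos hm1]
    simp
  · have hfd4 : PySem.Int.floordiv legs 4 = legs / 4 :=
      PySem.Int.floordiv_eq_ediv_of_pos (by norm_num)
    have hmod2 : PySem.Int.mod legs 2 = legs % 2 := PySem.Int.mod_eq_emod_of_pos (by norm_num)
    have hmod4 : PySem.Int.mod legs 4 = legs % 4 := PySem.Int.mod_eq_emod_of_pos (by norm_num)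
    have hm1' : 1 ≤ legs / 4 := by rw [hfd4] at hm1; omega
    obtain ⟨n, hn⟩ : ∃ n : Nat, legs / 4 = (n : Int) := ⟨(legs / 4).toNat, by omega⟩
    have hn1 : 1 ≤ (n : Int) := by omega
    have hfdn : PySem.Int.floordiv legs 4 = (n : Int) := by rw [hfd4, hn]
    set D : Int := breasts - legs + PySem.Int.mod legs 2 with hD
    set e : Int := if PySem.Int.mod legs 4 ≤ 1 then (n : Int) else 0 with he
    have hDe : D = breasts - legs + legs % 2 := by rw [hD, hmod2]
    have hee : e = if legs % 4 ≤ 1 then (n : Int) else 0 := by rw [he, hmod4]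
    -- A's count over the explicit candidate set
    have hcount : girls_and_pigs legs breasts =
        (((gapBase (n : Int)).filter (fun p => 2 * p ∣ D ∧ p ≠ e)).card : Int) := by
      rw [hA]
      rw [List.countP_congr (q := fun p => decide (2 * p ∣ D ∧ p ≠ e)) (fun p hp => by
        simp only [decide_eq_true_eq]
        rw [PySem.List.mem_pyRange_one] at hp
        rw [hDe, hee]
        exact gap_condA_iff legs breasts p (n : Int) hn (by rw [hfdn] at hp; exact hp))]
      rw [hfdn]
      exact gap_countP_card n (fun p => 2 * p ∣ D ∧ p ≠ e)
    -- unfold B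
    simp only [girls_and_pigs_alt]
    rw [hfdn, ← hD, ← he, if_neg (by omega : ¬ (n : Int) < 1)]
    by_cases hD0 : D = 0
    · rw [if_pos hD0, hcount]
      have hfe : (gapBase (n : Int)).filter (fun p => 2 * p ∣ D ∧ p ≠ e) =
          (gapBase (n : Int)).filter (fun p => p ≠ e) :=
        Finset.filter_congr (fun p _ => by simp [hD0])
      rw [hfe]
      by_cases h4 : PySem.Int.mod legs 4 ≤ 1
      · have he' : e = (n : Int) := by rw [he, if_pos h4]
        have hset : (gapBase (n : Int)).filter (fun p => p ≠ e) = gapBase ((n : Int) - 1) := by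
          ext x
          simp only [Finset.mem_filter, mem_gapBase, he']
          omega
        rw [hset, if_pos (by rw [he']; omega : e ≠ 0), card_gapBase]
        omega
      · have he' : e = 0 := by rw [he, if_neg h4]
        have hset : (gapBase (n : Int)).filter (fun p => p ≠ e) = gapBase (n : Int) := by
          ext x
          simp only [Finset.mem_filter, mem_gapBase, he']
          omega
        rw [hset, if_neg (by rw [he']; omega : ¬ e ≠ 0), card_gapBase]
        omega
    · rw [if_neg hD0]
      by_cases hD2 : PySem.Int.mod D 2 = 0
      · rw [if_neg (by omega : ¬ PySem.Int.mod D 2 ≠ 0)]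
        have hDm : D % 2 = 0 := by
          rw [← PySem.Int.mod_eq_emod_of_pos (by norm_num : (0:Int) < 2)]
          exact hD2
        have hMe : PySem.Int.floordiv ((D.natAbs : Int)) 2 = (D.natAbs : Int) / 2 :=
          PySem.Int.floordiv_eq_ediv_of_pos (by norm_num)
        rw [hcount, hMe]
        generalize hMg : (D.natAbs : Int) / 2 = M
        have hM2 : 2 * M = (D.natAbs : Int) := by omega
        have hM1 : 1 ≤ M := by omega
        have hcases : D = 2 * M ∨ D = -(2 * M) := by omega
        have hTeq : (gapBase (n : Int)).filter (fun p => 2 * p ∣ D ∧ p ≠ e) =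
            gapT M (n : Int) e 1 := by
          rw [gapT]
          apply Finset.filter_congr
          intro p hp
          rw [mem_gapBase] at hp
          have hdvdiff : 2 * p ∣ D ↔ p ∣ M := by
            rcases hcases with h | h <;> rw [h]
            · exact mul_dvd_mul_iff_left two_ne_zero
            · rw [dvd_neg]
              exact mul_dvd_mul_iff_left two_ne_zero
          constructor
          · rintro ⟨h1, h2⟩
            have hpM : p ∣ M := hdvdiff.1 h1
            obtain ⟨k, hk⟩ := hpM
            have hMp : M / p = k := by rw [hk]; exact Int.mul_ediv_cancel_left k (by omega)
            have hk1 : 1 ≤ k := by nlinarith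
            exact ⟨⟨k, hk⟩, h2, hp.1, by omega⟩
          · rintro ⟨h1, h2, _, _⟩
            exact ⟨hdvdiff.2 h1, h2⟩
        rw [hTeq]
        rw [gapAltLoop_spec M (n : Int) e M.toNat 1 0 (by norm_num)
          (by
            have hMt : ((M.toNat : Int)) = M := by omega
            rw [hMt]
            nlinarith)]
        simp
      · rw [if_pos hD2, hcount]
        have hfe : (gapBase (n : Int)).filter (fun p => 2 * p ∣ D ∧ p ≠ e) = ∅ := by
          ext p
          simp only [Finset.mem_filter, mem_gapBase, Finset.notMem_empty, iff_false, not_and]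
          rintro ⟨hp1, hp2⟩ ⟨k, hk⟩
          exfalso
          have h2d : (2 : Int) ∣ D := ⟨p * k, by rw [hk]; ring⟩
          have hDm : ¬ D % 2 = 0 := by
            rw [← PySem.Int.mod_eq_emod_of_pos (by norm_num : (0:Int) < 2)]
            exact hD2
          omega
        rw [hfe]
        simp
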